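-- pv_equiv track=rewrite | github.com/Lezh1n1208/MyHomeWork | Python_PtitCode/PY01041.py | solve
-- ===== SOURCE A (Python) =====
-- def solve(n):
--     str_num = str(n)
--     num_len = len(str(n))
--     if num_len < 3:
--         return "NO"
--     i = 1
--     while i < num_len and str_num[i] > str_num[i - 1]:
--         i += 1
--
--     if i == 1 or i == num_len:
--         return "NO"
--
--     while i < num_len and str_num[i] < str_num[i - 1]:
--         i += 1
--     if i == num_len:
--         return "YES"
--     else:
--         return "NO"
-- ===== SOURCE B (Python) =====
-- def solve(n):
--     s = str(n)
--     if len(s) < 3: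
--         return "NO"
--     peak = s.index(max(s))
--     if (0 < peak < len(s) - 1
--             and all(s[i] > s[i - 1] for i in range(1, peak + 1))
--             and all(s[i] < s[i - 1] for i in range(peak + 1, len(s)))):
--         return "YES"
--     return "NO"
-- ===== Notes on version B (the rewrite author's own statement) =====
-- stated objective: idiomatic
-- what changed: B replaces A's two stateful while-loops with a peak-first decomposition: it locates the peak as the first index of the maximum character and then verifies the strictly increasing prefix and strictly decreasing suffix with two all() checks.
import Mathlib
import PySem

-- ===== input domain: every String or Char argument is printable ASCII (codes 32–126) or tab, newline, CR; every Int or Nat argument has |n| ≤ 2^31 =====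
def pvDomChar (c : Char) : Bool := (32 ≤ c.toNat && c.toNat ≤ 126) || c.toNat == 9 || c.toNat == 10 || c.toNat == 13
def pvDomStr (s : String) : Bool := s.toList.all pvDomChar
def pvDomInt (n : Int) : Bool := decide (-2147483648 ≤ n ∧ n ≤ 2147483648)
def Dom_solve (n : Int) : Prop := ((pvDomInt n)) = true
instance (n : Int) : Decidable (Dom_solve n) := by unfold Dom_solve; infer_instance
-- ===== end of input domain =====

-- B replaces A's two stateful while-loops with a peak-first decomposition (first index of the maximum
-- character, then two all() checks on prefix/suffix); objective: more idiomatic, same cost.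

-- ===== PORT A =====
-- first while loop: i += 1 while i < num_len and str_num[i] > str_num[i-1]
def solveUp (cs : List Char) (L : Nat) (i : Nat) : Nat :=
  if h : i < L ∧ cs.getD (i - 1) ' ' < cs.getD i ' ' then solveUp cs L (i + 1) else i
termination_by L - i
decreasing_by omega

-- second while loop: i += 1 while i < num_len and str_num[i] < str_num[i-1]
def solveDown (cs : List Char) (L : Nat) (i : Nat) : Nat :=
  if h : i < L ∧ cs.getD i ' ' < cs.getD (i - 1) ' ' then solveDown cs L (i + 1) else i
termination_by L - i
decreasing_by omega

def solve (n : Int) : String :=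
  let cs := PySem.Int.toChars n
  let L := cs.length
  if L < 3 then "NO"
  else
    let i := solveUp cs L 1
    if i = 1 ∨ i = L then "NO"
    else
      let j := solveDown cs L i
      if j = L then "YES" else "NO"

-- ===== PORT B =====
-- m = max(s) and peak = s.index(m); the .getD defaults are pure totality guards
-- (here cs is nonempty and m ∈ cs, so Python's max/index never fail).
def solve_alt (n : Int) : String :=
  let cs := PySem.Int.toChars n
  if cs.length < 3 then "NO"
  else
    let m := (PySem.List.max? cs (fun c => c)).getD ' '
    let peak := (PySem.List.index? cs m).getD 0
    if 0 < peak ∧ peak < cs.length - 1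
        ∧ (PySem.List.pyRange 1 ((peak : Int) + 1) 1).all
            (fun i => decide (PySem.List.pyGetD cs (i - 1) ' ' < PySem.List.pyGetD cs i ' '))
        ∧ (PySem.List.pyRange ((peak : Int) + 1) (cs.length : Int) 1).all
            (fun i => decide (PySem.List.pyGetD cs i ' ' < PySem.List.pyGetD cs (i - 1) ' '))
    then "YES" else "NO"

-- ===== PRECONDITION & SPEC =====
def Spec_solve (n : Int) (out : String) : Prop := out = solve_alt n
instance (n : Int) (out : String) : Decidable (Spec_solve n out) := by unfold Spec_solve; infer_instance

-- ===== CLAIM (what is proved, stated in full; the proofs are below) =====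
def Claim_equal_solve : Prop := ∀ (n : Int), Dom_solve n → Spec_solve n (solve n)

-- ===== LEMMAS AND PROOFS =====

/-- `p` is a strict mountain peak of `cs`. -/
def Mountain (cs : List Char) (p : Nat) : Prop :=
  0 < p ∧ p + 1 < cs.length ∧
  (∀ k, k < p → cs.getD k ' ' < cs.getD (k + 1) ' ') ∧
  (∀ k, p ≤ k → k + 1 < cs.length → cs.getD (k + 1) ' ' < cs.getD k ' ')

theorem solveUp_spec_fuel (cs : List Char) (L : Nat) :
    ∀ fuel i, L - i ≤ fuel → i ≤ L →
      i ≤ solveUp cs L i ∧ solveUp cs L i ≤ L ∧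
      (∀ k, i ≤ k → k < solveUp cs L i → cs.getD (k - 1) ' ' < cs.getD k ' ') ∧
      (solveUp cs L i < L →
        ¬ cs.getD (solveUp cs L i - 1) ' ' < cs.getD (solveUp cs L i) ' ') := by
  intro fuel
  induction fuel with
  | zero =>
    intro i hf hiL
    rw [solveUp, dif_neg (by omega : ¬ (i < L ∧ cs.getD (i - 1) ' ' < cs.getD i ' '))]
    exact ⟨le_rfl, hiL, fun k hk1 hk2 => absurd hk2 (by omega), fun hlt => absurd hlt (by omega)⟩
  | succ fuel ih =>
    intro i hf hiL
    rw [solveUp]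
    split
    · rename_i h
      obtain ⟨r1, r2, r3, r4⟩ := ih (i + 1) (by omega) (by omega)
      refine ⟨by omega, r2, ?_, r4⟩
      intro k hk hk2
      rcases Nat.eq_or_lt_of_le hk with rfl | h2
      · exact h.2
      · exact r3 k (by omega) hk2
    · rename_i h
      exact ⟨le_rfl, hiL, fun k hk1 hk2 => absurd hk2 (by omega),
        fun hlt hc => h ⟨hlt, hc⟩⟩

theorem solveUp_spec (cs : List Char) (L i : Nat) (hiL : i ≤ L) :
    i ≤ solveUp cs L i ∧ solveUp cs L i ≤ L ∧
    (∀ k, i ≤ k → k < solveUp cs L i → cs.getD (k - 1) ' ' < cs.getD k ' ') ∧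
    (solveUp cs L i < L →
      ¬ cs.getD (solveUp cs L i - 1) ' ' < cs.getD (solveUp cs L i) ' ') :=
  solveUp_spec_fuel cs L (L - i) i le_rfl hiL

theorem solveDown_spec_fuel (cs : List Char) (L : Nat) :
    ∀ fuel i, L - i ≤ fuel → i ≤ L →
      i ≤ solveDown cs L i ∧ solveDown cs L i ≤ L ∧
      (∀ k, i ≤ k → k < solveDown cs L i → cs.getD k ' ' < cs.getD (k - 1) ' ') ∧
      (solveDown cs L i < L →
        ¬ cs.getD (solveDown cs L i) ' ' < cs.getD (solveDown cs L i - 1) ' ') := by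
  intro fuel
  induction fuel with
  | zero =>
    intro i hf hiL
    rw [solveDown, dif_neg (by omega : ¬ (i < L ∧ cs.getD i ' ' < cs.getD (i - 1) ' '))]
    exact ⟨le_rfl, hiL, fun k hk1 hk2 => absurd hk2 (by omega), fun hlt => absurd hlt (by omega)⟩
  | succ fuel ih =>
    intro i hf hiL
    rw [solveDown]
    split
    · rename_i h
      obtain ⟨r1, r2, r3, r4⟩ := ih (i + 1) (by omega) (by omega)
      refine ⟨by omega, r2, ?_, r4⟩
      intro k hk hk2
      rcases Nat.eq_or_lt_of_le hk with rfl | h2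
      · exact h.2
      · exact r3 k (by omega) hk2
    · rename_i h
      exact ⟨le_rfl, hiL, fun k hk1 hk2 => absurd hk2 (by omega),
        fun hlt hc => h ⟨hlt, hc⟩⟩

theorem solveDown_spec (cs : List Char) (L i : Nat) (hiL : i ≤ L) :
    i ≤ solveDown cs L i ∧ solveDown cs L i ≤ L ∧
    (∀ k, i ≤ k → k < solveDown cs L i → cs.getD k ' ' < cs.getD (k - 1) ' ') ∧
    (solveDown cs L i < L →
      ¬ cs.getD (solveDown cs L i) ' ' < cs.getD (solveDown cs L i - 1) ' ') :=
  solveDown_spec_fuel cs L (L - i) i le_rfl hiL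

theorem chain_lt (g : Nat → Char) :
    ∀ j i, i < j → (∀ k, i ≤ k → k < j → g k < g (k + 1)) → g i < g j := by
  intro j
  induction j with
  | zero => omega
  | succ j ih =>
    intro i hij h
    rcases Nat.eq_or_lt_of_le (Nat.le_of_lt_succ hij) with rfl | hlt
    · exact h i le_rfl (Nat.lt_succ_self _)
    · exact lt_trans (ih i hlt (fun k hk1 hk2 => h k hk1 (by omega)))
        (h j (by omega) (Nat.lt_succ_self _))

theorem chain_gt (g : Nat → Char) :
    ∀ j i, i < j → (∀ k, i ≤ k → k < j → g (k + 1) < g k) → g j < g i := by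
  intro j
  induction j with
  | zero => omega
  | succ j ih =>
    intro i hij h
    rcases Nat.eq_or_lt_of_le (Nat.le_of_lt_succ hij) with rfl | hlt
    · exact h i le_rfl (Nat.lt_succ_self _)
    · exact lt_trans (h j (by omega) (Nat.lt_succ_self _))
        (ih i hlt (fun k hk1 hk2 => h k hk1 (by omega)))

theorem mountain_strict_max {cs : List Char} {p : Nat} (hm : Mountain cs p) :
    ∀ k, k < cs.length → k ≠ p → cs.getD k ' ' < cs.getD p ' ' := by
  obtain ⟨h0, h1, hinc, hdec⟩ := hm
  intro k hk hne
  rcases Nat.lt_or_ge k p with h | h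
  · exact chain_lt (fun j => cs.getD j ' ') p k h (fun j hj1 hj2 => hinc j hj2)
  · have hkp : p < k := by omega
    exact chain_gt (fun j => cs.getD j ' ') k p hkp (fun j hj1 hj2 => hdec j hj1 (by omega))

-- A answers YES (given len ≥ 3) iff some strict mountain peak exists
theorem solveA_yes_iff (cs : List Char) (hL : 3 ≤ cs.length) :
    ((if solveUp cs cs.length 1 = 1 ∨ solveUp cs cs.length 1 = cs.length then "NO"
      else if solveDown cs cs.length (solveUp cs cs.length 1) = cs.length then "YES" else "NO")
        = "YES")
      ↔ ∃ p, Mountain cs p := by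
  obtain ⟨u1, u2, u3, u4⟩ := solveUp_spec cs cs.length 1 (by omega)
  set u := solveUp cs cs.length 1 with hu
  constructor
  · intro hyes
    by_cases hcase : u = 1 ∨ u = cs.length
    · rw [if_pos hcase] at hyes; exact absurd hyes (by decide)
    · rw [if_neg hcase] at hyes
      obtain ⟨d1, d2, d3, d4⟩ := solveDown_spec cs cs.length u u2
      set dn := solveDown cs cs.length u with hdn
      by_cases hdown : dn = cs.length
      · have hu1 : u ≠ 1 := fun h => hcase (Or.inl h)
        have huL : u ≠ cs.length := fun h => hcase (Or.inr h)
        refine ⟨u - 1, by omega, by omega, ?_, ?_⟩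
        · intro k hk
          have := u3 (k + 1) (by omega) (by omega)
          simpa using this
        · intro k hk hk1
          have := d3 (k + 1) (by omega) (by omega)
          simpa using this
      · rw [if_neg hdown] at hyes; exact absurd hyes (by decide)
  · rintro ⟨p, hm⟩
    obtain ⟨h0, h1, hinc, hdec⟩ := hm
    have hup : u = p + 1 := by
      rcases Nat.lt_trichotomy u (p + 1) with h | h | h
      · exfalso
        have huL : u < cs.length := by omega
        apply u4 huL
        have hstep := hinc (u - 1) (by omega)
        have heq : u - 1 + 1 = u := by omega
        rwa [heq] at hstep
      · exact h
      · exfalso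
        have hstep := u3 (p + 1) (by omega) (by omega)
        simp only [Nat.add_sub_cancel] at hstep
        exact absurd hstep (not_lt_of_gt (hdec p le_rfl h1))
    have hne : ¬ (u = 1 ∨ u = cs.length) := by omega
    rw [if_neg hne]
    obtain ⟨d1, d2, d3, d4⟩ := solveDown_spec cs cs.length u (by omega)
    set dn := solveDown cs cs.length u with hdn
    have hdown : dn = cs.length := by
      by_contra hne2
      have hlt : dn < cs.length := by omega
      apply d4 hlt
      have := hdec (dn - 1) (by omega) (by omega)
      have heq : dn - 1 + 1 = dn := by omega
      rwa [heq] at this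
    rw [if_pos hdown]

-- turn the pyRange/pyGetD all() checks into Nat-indexed facts
theorem all_up_iff (cs : List Char) (p : Nat) :
    ((PySem.List.pyRange 1 ((p : Int) + 1) 1).all
        (fun i => decide (PySem.List.pyGetD cs (i - 1) ' ' < PySem.List.pyGetD cs i ' ')) = true)
      ↔ ∀ k, k < p → cs.getD k ' ' < cs.getD (k + 1) ' ' := by
  rw [List.all_eq_true]
  constructor
  · intro h k hk
    have := h ((k : Int) + 1) ((PySem.List.mem_pyRange_one).mpr ⟨by omega, by omega⟩)
    simp only [add_sub_cancel_right] at this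
    rw [show ((k : Int) + 1) = ((k + 1 : Nat) : Int) by push_cast; ring,
      PySem.List.pyGetD_natCast, PySem.List.pyGetD_natCast] at this
    simpa using this
  · intro h i hi
    rw [PySem.List.mem_pyRange_one] at hi
    obtain ⟨hi1, hi2⟩ := hi
    have hk : i = ((i.toNat - 1 : Nat) : Int) + 1 := by omega
    set k := i.toNat - 1 with hkdef
    have hkp : k < p := by omega
    simp only [decide_eq_true_eq]
    rw [hk, show ((k : Int) + 1 - 1) = ((k : Nat) : Int) by ring,
      show ((k : Int) + 1) = ((k + 1 : Nat) : Int) by push_cast; ring,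
      PySem.List.pyGetD_natCast, PySem.List.pyGetD_natCast]
    exact h k hkp

theorem all_down_iff (cs : List Char) (p : Nat) :
    ((PySem.List.pyRange ((p : Int) + 1) ((cs.length : Int)) 1).all
        (fun i => decide (PySem.List.pyGetD cs i ' ' < PySem.List.pyGetD cs (i - 1) ' ')) = true)
      ↔ ∀ k, p ≤ k → k + 1 < cs.length → cs.getD (k + 1) ' ' < cs.getD k ' ' := by
  rw [List.all_eq_true]
  constructor
  · intro h k hk hk1
    have := h ((k : Int) + 1) ((PySem.List.mem_pyRange_one).mpr ⟨by omega, by omega⟩)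
    simp only [add_sub_cancel_right] at this
    rw [show ((k : Int) + 1) = ((k + 1 : Nat) : Int) by push_cast; ring,
      PySem.List.pyGetD_natCast, PySem.List.pyGetD_natCast] at this
    simpa using this
  · intro h i hi
    rw [PySem.List.mem_pyRange_one] at hi
    obtain ⟨hi1, hi2⟩ := hi
    have hk : i = ((i.toNat - 1 : Nat) : Int) + 1 := by omega
    set k := i.toNat - 1 with hkdef
    have hkp : p ≤ k := by omega
    have hkL : k + 1 < cs.length := by omega
    simp only [decide_eq_true_eq]
    rw [hk, show ((k : Int) + 1 - 1) = ((k : Nat) : Int) by ring,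
      show ((k : Int) + 1) = ((k + 1 : Nat) : Int) by push_cast; ring,
      PySem.List.pyGetD_natCast, PySem.List.pyGetD_natCast]
    exact h k hkp hkL

-- B answers YES (given len ≥ 3) iff some strict mountain peak exists
theorem solveB_yes_iff (cs : List Char) (hL : 3 ≤ cs.length) :
    ((if 0 < (PySem.List.index? cs ((PySem.List.max? cs (fun c => c)).getD ' ')).getD 0
          ∧ (PySem.List.index? cs ((PySem.List.max? cs (fun c => c)).getD ' ')).getD 0 < cs.length - 1
          ∧ (PySem.List.pyRange 1 (((PySem.List.index? cs ((PySem.List.max? cs (fun c => c)).getD ' ')).getD 0 : Int) + 1) 1).all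
              (fun i => decide (PySem.List.pyGetD cs (i - 1) ' ' < PySem.List.pyGetD cs i ' '))
          ∧ (PySem.List.pyRange (((PySem.List.index? cs ((PySem.List.max? cs (fun c => c)).getD ' ')).getD 0 : Int) + 1) (cs.length : Int) 1).all
              (fun i => decide (PySem.List.pyGetD cs i ' ' < PySem.List.pyGetD cs (i - 1) ' '))
      then "YES" else "NO") = "YES")
      ↔ ∃ p, Mountain cs p := by
  set peak := (PySem.List.index? cs ((PySem.List.max? cs (fun c => c)).getD ' ')).getD 0 with hpeak
  constructor
  · intro hyes
    split_ifs at hyes with h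
    · obtain ⟨h0, h1, h2, h3⟩ := h
      exact ⟨peak, h0, by omega, (all_up_iff cs peak).mp h2, (all_down_iff cs peak).mp h3⟩
    · exact absurd hyes (by decide)
  · rintro ⟨p, hm⟩
    have hpL : p < cs.length := by have := hm.2.1; omega
    have hsm := mountain_strict_max hm
    have hne : cs ≠ [] := by intro h; rw [h] at hL; simp at hL
    -- max(s) is cs[p]
    have hmaxeq : PySem.List.max? cs (fun c => c) = some (cs.getD p ' ') := by
      cases hmax : PySem.List.max? cs (fun c => c) with
      | none => exact absurd ((PySem.List.max?_eq_none_iff _ _).mp hmax) hne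
      | some m =>
        have hmem : m ∈ cs := PySem.List.max?_mem hmax
        have hmax' := PySem.List.max?_isMax hmax
        obtain ⟨k, hk, hkm⟩ := List.mem_iff_getElem.mp hmem
        by_cases hkp : k = p
        · subst hkp; rw [← hkm, List.getD_eq_getElem cs ' ' hk]
        · exfalso
          have hlt := hsm k hk hkp
          rw [List.getD_eq_getElem cs ' ' hk, hkm] at hlt
          have hle : cs.getD p ' ' ≤ m := by
            have := hmax' (cs.getD p ' ')
              (by rw [List.getD_eq_getElem cs ' ' hpL]; exact List.getElem_mem hpL)
            simpa using this
          exact absurd hlt (not_lt_of_ge hle)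
    -- s.index(max(s)) is p
    have hidxeq : PySem.List.index? cs (cs.getD p ' ') = some p := by
      rw [PySem.List.index?_eq_some_iff]
      refine ⟨cs.take p, cs.drop (p + 1), ?_, by simp [Nat.min_eq_left (le_of_lt hpL)], ?_⟩
      · rw [List.getD_eq_getElem cs ' ' hpL]
        conv_lhs => rw [← List.take_append_drop p cs]
        rw [List.drop_eq_getElem_cons hpL]
      · intro hmm
        obtain ⟨j, hj, hjm⟩ := List.mem_iff_getElem.mp hmm
        rw [List.length_take] at hj
        have hjL : j < cs.length := by omega
        rw [List.getElem_take] at hjm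
        have hlt := hsm j hjL (by omega)
        rw [List.getD_eq_getElem cs ' ' hjL, hjm] at hlt
        exact absurd hlt (lt_irrefl _)
    have hp : peak = p := by rw [hpeak, hmaxeq, Option.getD_some, hidxeq, Option.getD_some]
    subst hp
    rw [if_pos ⟨hm.1, by have := hm.2.1; omega, (all_up_iff cs peak).mpr hm.2.2.1,
      (all_down_iff cs peak).mpr hm.2.2.2⟩]

theorem main_eq (cs : List Char) :
    (if cs.length < 3 then "NO"
     else
       if solveUp cs cs.length 1 = 1 ∨ solveUp cs cs.length 1 = cs.length then "NO"
       else if solveDown cs cs.length (solveUp cs cs.length 1) = cs.length then "YES" else "NO")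
    = (if cs.length < 3 then "NO"
       else
         if 0 < (PySem.List.index? cs ((PySem.List.max? cs (fun c => c)).getD ' ')).getD 0
             ∧ (PySem.List.index? cs ((PySem.List.max? cs (fun c => c)).getD ' ')).getD 0 < cs.length - 1
             ∧ (PySem.List.pyRange 1 (((PySem.List.index? cs ((PySem.List.max? cs (fun c => c)).getD ' ')).getD 0 : Int) + 1) 1).all
                 (fun i => decide (PySem.List.pyGetD cs (i - 1) ' ' < PySem.List.pyGetD cs i ' '))
             ∧ (PySem.List.pyRange (((PySem.List.index? cs ((PySem.List.max? cs (fun c => c)).getD ' ')).getD 0 : Int) + 1) (cs.length : Int) 1).all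
                 (fun i => decide (PySem.List.pyGetD cs i ' ' < PySem.List.pyGetD cs (i - 1) ' '))
         then "YES" else "NO") := by
  by_cases hL : cs.length < 3
  · rw [if_pos hL, if_pos hL]
  · rw [if_neg hL, if_neg hL]
    have hL3 : 3 ≤ cs.length := by omega
    have ha := solveA_yes_iff cs hL3
    have hb := solveB_yes_iff cs hL3
    by_cases hp : ∃ p, Mountain cs p
    · rw [ha.mpr hp, hb.mpr hp]
    · set lhs := (if solveUp cs cs.length 1 = 1 ∨ solveUp cs cs.length 1 = cs.length then "NO"
        else if solveDown cs cs.length (solveUp cs cs.length 1) = cs.length then "YES" else "NO")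
        with hlhs
      have hlno : lhs = "NO" := by
        rcases eq_or_ne lhs "YES" with h | h
        · exact absurd (ha.mp h) hp
        · rw [hlhs] at h ⊢; split_ifs at h ⊢ <;> first | rfl | exact absurd rfl h
      have hrno : (if 0 < (PySem.List.index? cs ((PySem.List.max? cs (fun c => c)).getD ' ')).getD 0
             ∧ (PySem.List.index? cs ((PySem.List.max? cs (fun c => c)).getD ' ')).getD 0 < cs.length - 1
             ∧ (PySem.List.pyRange 1 (((PySem.List.index? cs ((PySem.List.max? cs (fun c => c)).getD ' ')).getD 0 : Int) + 1) 1).all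
                 (fun i => decide (PySem.List.pyGetD cs (i - 1) ' ' < PySem.List.pyGetD cs i ' '))
             ∧ (PySem.List.pyRange (((PySem.List.index? cs ((PySem.List.max? cs (fun c => c)).getD ' ')).getD 0 : Int) + 1) (cs.length : Int) 1).all
                 (fun i => decide (PySem.List.pyGetD cs i ' ' < PySem.List.pyGetD cs (i - 1) ' '))
         then "YES" else "NO") = "NO" := by
        split_ifs with h
        · exact absurd (hb.mp (by rw [if_pos h])) hp
        · rfl
      rw [hlno, hrno]

-- ===== VERDICT (by name: the statement is the Claim_ definition above) =====
theorem solve_spec : Claim_equal_solve := by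
  intro n _
  unfold Spec_solve solve solve_alt
  exact main_eq (PySem.Int.toChars n)
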